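-- pv_equiv track=rewrite | github.com/TilenG2/Programiranje1 | Domace_Naloge/DN5_test.py | senca
-- ===== SOURCE A (Python) =====
-- ovire1 = [(1, 3, 6), (2, 4, 3), (4, 6, 7),
--           (3, 4, 9), (6, 9, 5), (9, 10, 2), (9, 10, 8)]
--
-- def globina(ovire, x):
--     height = 0
--     for _, _, y in ovire1:
--         if height < y:
--             height = y
--
--     i = 1
--     test = False
--     while i < 10:
--         for x1, x2, y in ovire:
--             if i == y and x1 <= x <= x2:
--                 return i
--         if test: break
--         i += 1
--     return None
--
-- def senca(ovire):
--     width = 0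
--     for _, x, _ in ovire:
--         if width < x:
--             width = x
--
--     seznam = []
--     i = 1
--     while i <= width:
--         if globina(ovire, i) is None:
--             seznam.append(True)
--         else:
--             seznam.append(False)
--         i += 1
--     return seznam
-- ===== SOURCE B (Python) =====
-- def senca(ovire):
--     width = 0
--     for _, x2, _ in ovire:
--         if width < x2:
--             width = x2
--     # difference array over columns 1..width
--     diff = [0] * (width + 2)
--     for x1, x2, y in ovire:
--         if 1 <= y <= 9:
--             lo = max(x1, 1)
--             hi = min(x2, width)
--             if lo <= hi:
--                 diff[lo] += 1
--                 diff[hi + 1] -= 1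
--     result = []
--     cur = 0
--     for i in range(1, width + 1):
--         cur += diff[i]
--         result.append(cur == 0)
--     return result
-- ===== Notes on version B (the rewrite author's own statement) =====
-- stated objective: faster
-- what changed: B replaces A's per-column rescan of all obstacles for each height 1..9 with a difference array marked once per obstacle followed by a single prefix-sum pass over the columns.
import Mathlib
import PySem

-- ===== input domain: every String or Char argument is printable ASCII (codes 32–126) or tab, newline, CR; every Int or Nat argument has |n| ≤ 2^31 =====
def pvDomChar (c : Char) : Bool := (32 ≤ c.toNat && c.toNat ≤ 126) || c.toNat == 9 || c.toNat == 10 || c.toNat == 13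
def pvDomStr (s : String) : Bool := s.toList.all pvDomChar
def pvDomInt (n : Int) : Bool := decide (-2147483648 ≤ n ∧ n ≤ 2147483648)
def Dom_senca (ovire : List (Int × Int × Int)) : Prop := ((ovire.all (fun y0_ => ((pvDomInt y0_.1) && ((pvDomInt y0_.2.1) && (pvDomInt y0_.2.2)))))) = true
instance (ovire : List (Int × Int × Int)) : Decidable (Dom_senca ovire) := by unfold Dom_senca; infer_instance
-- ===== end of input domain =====

-- B replaces A's per-column scan over all obstacles and heights 1..9 with a difference
-- array marked once per obstacle and one prefix-sum pass over the columns (objective: faster).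

-- ===== PORT A =====
-- module-level constant used (only) by globina's dead height loop
def ovire1 : List (Int × Int × Int) :=
  [(1, 3, 6), (2, 4, 3), (4, 6, 7), (3, 4, 9), (6, 9, 5), (9, 10, 2), (9, 10, 8)]

-- the 'while i < 10' loop of globina; fuel = number of remaining iterations (10 - i);
-- the 'test' flag is always False, so the loop simply runs i = 1..9
def globinaLoop (ovire : List (Int × Int × Int)) (x : Int) (i : Int) : Nat → Option Int
  | 0 => none
  | Nat.succ f =>
    if i < 10 then
      match ovire.find? (fun o => i == o.2.2 && (decide (o.1 ≤ x) && decide (x ≤ o.2.1))) with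
      | some _ => some i
      | none => globinaLoop ovire x (i + 1) f
    else none

def globina (ovire : List (Int × Int × Int)) (x : Int) : Option Int :=
  let _height := ovire1.foldl (fun h o => if h < o.2.2 then o.2.2 else h) 0
  globinaLoop ovire x 1 9

def senca (ovire : List (Int × Int × Int)) : List Bool :=
  let width := ovire.foldl (fun w o => if w < o.2.1 then o.2.1 else w) 0
  (PySem.List.pyRange 1 (width + 1) 1).foldl
    (fun sez i => if globina ovire i = none then sez ++ [true] else sez ++ [false]) []

-- ===== PORT B =====
def widthOf (ovire : List (Int × Int × Int)) : Int :=
  ovire.foldl (fun w o => if w < o.2.1 then o.2.1 else w) 0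

-- one obstacle's two difference-array updates: diff[lo] += 1; diff[hi+1] -= 1
def diffStep (w : Int) (d : List Int) (o : Int × Int × Int) : List Int :=
  if 1 ≤ o.2.2 ∧ o.2.2 ≤ 9 then
    let lo := max o.1 1
    let hi := min o.2.1 w
    if lo ≤ hi then
      let d1 := d.set lo.toNat (d.getD lo.toNat 0 + 1)
      d1.set (hi + 1).toNat (d1.getD (hi + 1).toNat 0 - 1)
    else d
  else d

def senca_alt (ovire : List (Int × Int × Int)) : List Bool :=
  let w := widthOf ovire
  let diff := ovire.foldl (diffStep w) (List.replicate (w + 2).toNat 0)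
  ((PySem.List.pyRange 1 (w + 1) 1).foldl
    (fun st i =>
      let cur := st.1 + diff.getD i.toNat 0
      (cur, st.2 ++ [decide (cur = 0)]))
    ((0 : Int), ([] : List Bool))).2

-- ===== PRECONDITION & SPEC =====
def Spec_senca (ovire : List (Int × Int × Int)) (out : List Bool) : Prop := out = senca_alt ovire
instance (ovire : List (Int × Int × Int)) (out : List Bool) : Decidable (Spec_senca ovire out) := by unfold Spec_senca; infer_instance

-- ===== CLAIM (what is proved, stated in full; the proofs are below) =====
def Claim_equal_senca : Prop := ∀ (ovire : List (Int × Int × Int)), Dom_senca ovire → Spec_senca ovire (senca ovire)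

-- ===== LEMMAS AND PROOFS =====

-- number of obstacles (with height 1..9) whose clamped interval covers column x
def ccount (ovire : List (Int × Int × Int)) (w x : Int) : Nat :=
  ovire.countP (fun o => decide (1 ≤ o.2.2 ∧ o.2.2 ≤ 9 ∧ max o.1 1 ≤ x ∧ x ≤ min o.2.1 w))

-- prefix sum of diff over indices 1..i
def psum (d : List Int) (i : Nat) : Int :=
  ((List.range i).map (fun j => d.getD (j + 1) 0)).sum

lemma le_widthFold : ∀ (l : List (Int × Int × Int)) (w : Int),
    w ≤ l.foldl (fun w o => if w < o.2.1 then o.2.1 else w) w := by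
  intro l
  induction l with
  | nil => intro w; simp
  | cons o t ih =>
    intro w
    refine le_trans ?_ (by simpa using ih (if w < o.2.1 then o.2.1 else w))
    split <;> omega

lemma widthOf_nonneg (ovire : List (Int × Int × Int)) : 0 ≤ widthOf ovire :=
  le_widthFold ovire 0

lemma globinaLoop_none (ovire : List (Int × Int × Int)) (x : Int) :
    ∀ (fuel : Nat) (i : Int), i + fuel = 10 →
      (globinaLoop ovire x i fuel = none ↔
        ∀ o ∈ ovire, ¬ (i ≤ o.2.2 ∧ o.2.2 ≤ 9 ∧ o.1 ≤ x ∧ x ≤ o.2.1)) := by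
  intro fuel
  induction fuel with
  | zero =>
    intro i hi
    simp only [globinaLoop]
    constructor
    · intro _ o _ h; omega
    · intro _; trivial
  | succ f ih =>
    intro i hi
    simp only [globinaLoop]
    rw [if_pos (by omega : i < 10)]
    cases hfind : ovire.find? (fun o => i == o.2.2 && (decide (o.1 ≤ x) && decide (x ≤ o.2.1))) with
    | some o =>
      simp only
      constructor
      · intro h; cases h
      · intro h
        exfalso
        have hmem := List.mem_of_find?_eq_some hfind
        have hp := List.find?_some hfind
        simp only [Bool.and_eq_true, beq_iff_eq, decide_eq_true_eq] at hp
        exact h o hmem ⟨by omega, by omega, hp.2.1, hp.2.2⟩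
    | none =>
      simp only
      rw [ih (i + 1) (by omega)]
      have hall := List.find?_eq_none.mp hfind
      constructor
      · intro h o ho hc
        by_cases he : o.2.2 = i
        · have hno := hall o ho
          simp only [Bool.and_eq_true, beq_iff_eq, decide_eq_true_eq] at hno
          exact hno ⟨he.symm, hc.2.2.1, hc.2.2.2⟩
        · exact h o ho ⟨by omega, hc.2.1, hc.2.2⟩
      · intro h o ho hc
        exact h o ho ⟨by omega, hc.2.1, hc.2.2⟩

lemma globina_none (ovire : List (Int × Int × Int)) (x : Int) :
    (globina ovire x = none) ↔
      ∀ o ∈ ovire, ¬ (1 ≤ o.2.2 ∧ o.2.2 ≤ 9 ∧ o.1 ≤ x ∧ x ≤ o.2.1) := by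
  unfold globina
  exact globinaLoop_none ovire x 9 1 (by norm_num)

lemma psum_set (d : List Int) (k : Nat) (v : Int) (i : Nat) (hk1 : 1 ≤ k) (hk : k < d.length) :
    psum (d.set k v) i = psum d i + (if k ≤ i then v - d.getD k 0 else 0) := by
  unfold psum
  induction i with
  | zero => simp; omega
  | succ i ih =>
    rw [List.range_succ]
    simp only [List.map_append, List.sum_append, List.map_cons, List.map_nil, List.sum_cons,
      List.sum_nil, add_zero]
    rw [ih]
    have hgd : (d.set k v).getD (i + 1) 0 = if k = i + 1 then v else d.getD (i + 1) 0 := by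
      simp [List.getD, List.getElem?_set, hk]
      split <;> simp
    rw [hgd]
    by_cases h1 : k = i + 1
    · subst h1; simp
    · by_cases h2 : k ≤ i
      · have : k ≤ i + 1 := by omega
        simp [h1, h2, this]; ring
      · have : ¬ k ≤ i + 1 := by omega
        simp [h1, h2, this]

lemma psum_diffStep (w : Int) (d : List Int) (o : Int × Int × Int) (i : Nat)
    (hlen : d.length = (w + 2).toNat) (hw : 0 ≤ w) :
    psum (diffStep w d o) i
      = psum d i + (if 1 ≤ o.2.2 ∧ o.2.2 ≤ 9 ∧ max o.1 1 ≤ (i : Int) ∧ (i : Int) ≤ min o.2.1 w then 1 else 0) := by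
  unfold diffStep
  dsimp only
  by_cases hy : 1 ≤ o.2.2 ∧ o.2.2 ≤ 9
  · simp only [hy, if_true, true_and]
    by_cases hlh : max o.1 1 ≤ min o.2.1 w
    · simp only [hlh, if_true]
      have h1lo : (1 : Int) ≤ max o.1 1 := le_max_right _ _
      have hhiw : min o.2.1 w ≤ w := min_le_right _ _
      have hlo_lt : (max o.1 1).toNat < d.length := by rw [hlen]; omega
      have hlen1 : (d.set (max o.1 1).toNat (d.getD (max o.1 1).toNat 0 + 1)).length = d.length := by
        simp
      have hhi1_lt : (min o.2.1 w + 1).toNat < (d.set (max o.1 1).toNat (d.getD (max o.1 1).toNat 0 + 1)).length := by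
        rw [hlen1, hlen]; omega
      rw [psum_set _ _ _ _ (by omega) hhi1_lt, psum_set _ _ _ _ (by omega) hlo_lt]
      have e1 : d.getD (max o.1 1).toNat 0 + 1 - d.getD (max o.1 1).toNat 0 = 1 := by ring
      rw [e1]
      have e2 : ∀ a : Int, a - 1 - a = -1 := by intro a; ring
      rw [e2]
      split_ifs <;> omega
    · simp only [hlh, if_false]
      have hni : ¬ (max o.1 1 ≤ (i : Int) ∧ (i : Int) ≤ min o.2.1 w) := by omega
      rw [if_neg hni]
      ring
  · rw [if_neg hy, if_neg (fun h => hy ⟨h.1, h.2.1⟩)]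
    ring

lemma length_diffStep (w : Int) (d : List Int) (o : Int × Int × Int) :
    (diffStep w d o).length = d.length := by
  unfold diffStep
  dsimp only
  split
  · split <;> simp
  · rfl

lemma psum_foldl (w : Int) (hw : 0 ≤ w) (ovire : List (Int × Int × Int)) :
    ∀ (d : List Int), d.length = (w + 2).toNat → ∀ i : Nat,
      psum (ovire.foldl (diffStep w) d) i = psum d i + (ccount ovire w (i : Int) : Int) := by
  induction ovire with
  | nil => intro d hd i; simp [ccount]
  | cons o t ih =>
    intro d hd i
    simp only [List.foldl_cons]
    rw [ih (diffStep w d o) (by rw [length_diffStep, hd]) i, psum_diffStep w d o i hd hw]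
    simp only [ccount, List.countP_cons, decide_eq_true_eq]
    split_ifs <;> push_cast <;> ring

lemma psum_replicate (n i : Nat) : psum (List.replicate n (0 : Int)) i = 0 := by
  unfold psum
  induction i with
  | zero => simp
  | succ i ih =>
    rw [List.range_succ]
    simp only [List.map_append, List.sum_append, List.map_cons, List.map_nil]
    rw [ih]
    simp only [zero_add, List.getD, List.getElem?_replicate]
    split <;> rfl

lemma bfold_eq (diff : List Int) :
    ∀ n : Nat,
      ((PySem.List.pyRange 1 ((n : Int) + 1) 1).foldl
        (fun (st : Int × List Bool) i =>
          let cur := st.1 + diff.getD i.toNat 0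
          (cur, st.2 ++ [decide (cur = 0)]))
        ((0 : Int), ([] : List Bool)))
      = (psum diff n, (List.range n).map (fun k => decide (psum diff (k + 1) = 0))) := by
  intro n
  induction n with
  | zero =>
    rw [PySem.List.pyRange_one_eq_nil (by norm_num)]
    simp [psum]
  | succ n ih =>
    have hcast : ((n + 1 : Nat) : Int) + 1 = ((n : Int) + 1) + 1 := by push_cast; ring
    rw [hcast, PySem.List.pyRange_one_succ_right (by omega), List.foldl_append, ih]
    have htn : ((n : Int) + 1).toNat = n + 1 := by omega
    have hps : psum diff (n + 1) = psum diff n + diff.getD (n + 1) 0 := by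
      unfold psum
      rw [List.range_succ]
      simp
    rw [List.foldl_cons, List.foldl_nil]
    dsimp only
    rw [htn, List.range_succ, List.map_append]
    simp [hps]

lemma foldl_if_append (p : Int → Prop) [DecidablePred p] :
    ∀ (l : List Int) (acc : List Bool),
      l.foldl (fun sez i => if p i then sez ++ [true] else sez ++ [false]) acc
        = acc ++ l.map (fun i => decide (p i)) := by
  intro l
  induction l with
  | nil => intro acc; simp
  | cons a t ih =>
    intro acc
    simp only [List.foldl_cons, List.map_cons]
    rw [ih]
    by_cases h : p a <;> simp [h]

-- ===== VERDICT (by name: the statement is the Claim_ definition above) =====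
theorem senca_spec : Claim_equal_senca := by
  unfold Claim_equal_senca
  intro ovire _
  unfold Spec_senca senca senca_alt
  dsimp only
  have hfold : ovire.foldl (fun w o => if w < o.2.1 then o.2.1 else w) 0 = widthOf ovire := rfl
  rw [hfold]
  have hw : 0 ≤ widthOf ovire := widthOf_nonneg ovire
  set w := widthOf ovire with hwdef
  set diff := ovire.foldl (diffStep w) (List.replicate (w + 2).toNat 0) with hdiff
  -- A side: the append loop is a map over the range
  rw [foldl_if_append (fun i => globina ovire i = none) _ []]
  -- B side: evaluate the prefix-sum fold
  have hwc : ((w.toNat : Int)) = w := Int.toNat_of_nonneg hw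
  rw [show w + 1 = (w.toNat : Int) + 1 by rw [hwc], bfold_eq diff w.toNat]
  rw [PySem.List.pyRange_one 1 ((w.toNat : Int) + 1)]
  simp only [List.nil_append, List.map_map]
  rw [show ((w.toNat : Int) + 1 - 1).toNat = w.toNat by omega]
  apply List.map_congr_left
  intro k hk
  have hklt : k < w.toNat := List.mem_range.mp hk
  simp only [Function.comp_apply]
  have hrep : (List.replicate (w + 2).toNat (0 : Int)).length = (w + 2).toNat := by simp
  rw [hdiff, psum_foldl w hw ovire _ hrep (k + 1), psum_replicate, zero_add]
  have hc : ((k + 1 : Nat) : Int) = (k : Int) + 1 := by push_cast; ring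
  rw [hc]
  rw [decide_eq_decide]
  rw [globina_none]
  rw [show ((ccount ovire w ((k : Int) + 1) : Int) = 0) ↔ (ccount ovire w ((k : Int) + 1) = 0) by
    exact_mod_cast Iff.rfl]
  unfold ccount
  rw [List.countP_eq_zero]
  have hxw : (k : Int) + 1 ≤ w := by omega
  constructor
  · intro h o ho hp
    simp only [decide_eq_true_eq, max_le_iff, le_min_iff] at hp
    obtain ⟨hy1, hy2, ⟨ha1, ha2⟩, hb1, hb2⟩ := hp
    exact h o ho ⟨hy1, hy2, by omega, by omega⟩
  · intro h o ho hp
    obtain ⟨hy1, hy2, ha, hb⟩ := hp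
    refine h o ho ?_
    simp only [decide_eq_true_eq, max_le_iff, le_min_iff]
    exact ⟨hy1, hy2, ⟨by omega, by omega⟩, by omega, by omega⟩
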